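-- pv_equiv track=rewrite | github.com/adhnanjeff/LeetCode | Problems/258.AddDigits.py | addDigits
-- ===== SOURCE A (Python) =====
-- def addDigits(num):
--     def add(num):
--         res = 0
--         while num > 0:
--             rem = num % 10
--             res += rem
--             num //= 10
--         return res
--     while num > 10:
--         num = add(num)
--     return num
--
-- num = 38
-- ===== SOURCE B (Python) =====
-- def addDigits(num):
--     if num < 10:
--         return num
--     return 1 + (num - 1) % 9
-- ===== Notes on version B (the rewrite author's own statement) =====
-- stated objective: simpler
-- what changed: Replaced A's nested loops (repeat an arithmetic digit-sum pass until the value is <= 10) by the O(1) digital-root congruence 1 + (num - 1) % 9 with the single-digit base case returning num unchanged.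
-- intended difference: On num = 10 and on num > 10 with num ≡ 1 (mod 9) that are not powers of ten, A's off-by-one loop condition `while num > 10` stops one iteration early and returns the two-digit value 10; B returns the digital root 1, the intended single-digit result of repeatedly adding digits. — e.g. on addDigits(19): A returns 10, B returns 1
import Mathlib
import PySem

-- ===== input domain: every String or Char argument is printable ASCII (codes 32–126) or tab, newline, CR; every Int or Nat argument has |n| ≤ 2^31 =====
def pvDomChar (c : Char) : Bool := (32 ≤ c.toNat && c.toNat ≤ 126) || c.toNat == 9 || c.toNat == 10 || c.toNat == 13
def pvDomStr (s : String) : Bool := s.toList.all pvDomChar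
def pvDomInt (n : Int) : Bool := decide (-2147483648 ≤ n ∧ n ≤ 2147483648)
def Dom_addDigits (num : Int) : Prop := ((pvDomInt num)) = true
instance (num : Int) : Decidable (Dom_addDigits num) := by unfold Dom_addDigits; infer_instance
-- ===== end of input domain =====

-- B replaces A's iterated digit-sum loops by the O(1) digital-root congruence
-- 1 + (num - 1) % 9 with a single-digit base case; objective: simpler.

-- ===== PORT A =====

-- inner helper `add`: res = 0; while num > 0: res += num % 10; num //= 10
-- (fuel num.toNat only makes the loop total; num strictly decreases each pass)
def addAddLoop : Nat → Int → Int → Int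
  | 0, _, res => res
  | fuel + 1, num, res =>
    if 0 < num then
      addAddLoop fuel (PySem.Int.floordiv num 10) (res + PySem.Int.mod num 10)
    else res

def addA (num : Int) : Int := addAddLoop num.toNat num 0

-- outer loop: while num > 10: num = add(num)   (fuel num.toNat: add(num) < num)
def addDigitsLoop : Nat → Int → Int
  | 0, num => num
  | fuel + 1, num => if 10 < num then addDigitsLoop fuel (addA num) else num

def addDigits (num : Int) : Int := addDigitsLoop num.toNat num

-- ===== PORT B =====

def addDigits_alt (num : Int) : Int :=
  if num < 10 then num else 1 + PySem.Int.mod (num - 1) 9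

-- ===== PRECONDITION & SPEC =====

-- the powers of ten strictly between 10 and 2^31 (used by D_addDigits below)
def pow10s : List Int :=
  [100, 1000, 10000, 100000, 1000000, 10000000, 100000000, 1000000000]

-- On num = 10 and on num > 10 with num ≡ 1 (mod 9) that are not powers of ten, A's
-- off-by-one loop condition `while num > 10` stops one iteration early and returns the
-- two-digit value 10; B returns the digital root 1, the intended single-digit result.
def D_addDigits (num : Int) : Prop :=
  num = 10 ∨ (10 < num ∧ num % 9 = 1 ∧ num ∉ pow10s)
instance (num : Int) : Decidable (D_addDigits num) := by unfold D_addDigits; infer_instance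

def Spec_addDigits (num : Int) (out : Int) : Prop :=
  ¬ D_addDigits num → out = addDigits_alt num
instance (num : Int) (out : Int) : Decidable (Spec_addDigits num out) := by
  unfold Spec_addDigits; infer_instance

def pvDiffWitness_addDigits : Int := 19
def pvDiffWitnessOut_addDigits : Int × Int := (10, 1)

-- ===== CLAIM (what is proved, stated in full; the proofs are below) =====
def Claim_unchanged_addDigits : Prop :=
  ∀ (num : Int), Dom_addDigits num → Spec_addDigits num (addDigits num)
def Claim_changed_addDigits : Prop :=
  Dom_addDigits (pvDiffWitness_addDigits) ∧ D_addDigits (pvDiffWitness_addDigits) ∧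
  addDigits (pvDiffWitness_addDigits) = pvDiffWitnessOut_addDigits.1 ∧
  addDigits_alt (pvDiffWitness_addDigits) = pvDiffWitnessOut_addDigits.2 ∧
  pvDiffWitnessOut_addDigits.1 ≠ pvDiffWitnessOut_addDigits.2
def Claim_exact_addDigits : Prop :=
  ∀ (num : Int), Dom_addDigits num → D_addDigits num → addDigits num ≠ addDigits_alt num

-- ===== LEMMAS AND PROOFS =====

-- any sufficient fuel computes the digit sum, shifted by the accumulator
theorem addAddLoop_eq_addA (f : Nat) : ∀ (num res : Int), num.toNat ≤ f →
    addAddLoop f num res = res + addA num := by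
  induction f using Nat.strong_induction_on with
  | _ f ih =>
    intro num res hf
    by_cases h : 0 < num
    · obtain ⟨g, rfl⟩ : ∃ g, f = g + 1 := ⟨f - 1, by omega⟩
      obtain ⟨t, ht⟩ : ∃ t, num.toNat = t + 1 := ⟨num.toNat - 1, by omega⟩
      have hq : (PySem.Int.floordiv num 10).toNat ≤ t := by
        rw [PySem.Int.floordiv_eq_ediv_of_pos (by norm_num : (0:Int) < 10)]
        omega
      simp only [addAddLoop, h, if_true]
      rw [ih g (by omega) _ _ (by omega)]
      conv_rhs => rw [addA, ht]
      conv_rhs => simp only [addAddLoop, h, if_true]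
      rw [ih t (by omega) _ _ hq]
      omega
    · have h0 : num.toNat = 0 := by omega
      cases f with
      | zero => simp [addAddLoop, addA, h0]
      | succ f => simp [addAddLoop, addA, h, h0]

-- digit-sum recurrence, in terms of Lean's `/` and `%`
theorem s_rec (n : Int) (h : 0 < n) : addA n = n % 10 + addA (n / 10) := by
  obtain ⟨t, ht⟩ : ∃ t, n.toNat = t + 1 := ⟨n.toNat - 1, by omega⟩
  rw [addA, ht]
  simp only [addAddLoop, h, if_true]
  rw [addAddLoop_eq_addA t _ _ (by
    rw [PySem.Int.floordiv_eq_ediv_of_pos (by norm_num : (0:Int) < 10)]; omega)]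
  simp only [PySem.Int.floordiv_eq_ediv_of_pos (by norm_num : (0:Int) < 10),
    PySem.Int.mod_eq_emod_of_pos (by norm_num : (0:Int) < 10)]
  omega

theorem s_zero (n : Int) (h : ¬ 0 < n) : addA n = 0 := by
  have h0 : n.toNat = 0 := by omega
  simp [addA, h0, addAddLoop]

theorem s_nonneg (n : Int) : 0 ≤ addA n := by
  by_cases h : 0 < n
  · rw [s_rec n h]
    have := s_nonneg (n / 10)
    omega
  · rw [s_zero n h]
termination_by n.toNat
decreasing_by omega

theorem s_pos (n : Int) (h : 1 ≤ n) : 1 ≤ addA n := by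
  rw [s_rec n (by omega)]
  by_cases h10 : n ≤ 9
  · have : n / 10 = 0 := by omega
    rw [this, s_zero 0 (by omega)]
    omega
  · have := s_pos (n / 10) (by omega)
    omega
termination_by n.toNat
decreasing_by omega

theorem s_le (n : Int) (h : 0 ≤ n) : addA n ≤ n := by
  by_cases h0 : 0 < n
  · rw [s_rec n h0]
    have := s_le (n / 10) (by omega)
    omega
  · rw [s_zero n h0]; omega
termination_by n.toNat
decreasing_by omega

-- strict decrease of the digit sum under A's outer loop
theorem s_lt (n : Int) (h : 10 < n) : addA n < n := by
  rw [s_rec n (by omega)]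
  have := s_le (n / 10) (by omega)
  omega

theorem s_mod9 (n : Int) (h : 0 ≤ n) : addA n % 9 = n % 9 := by
  by_cases h0 : 0 < n
  · rw [s_rec n h0]
    have := s_mod9 (n / 10) (by omega)
    omega
  · rw [s_zero n h0]; omega
termination_by n.toNat
decreasing_by omega

theorem s_le_pow : ∀ (k : ℕ) (n : Int), 0 ≤ n → n < 10 ^ k → addA n ≤ 9 * k := by
  intro k
  induction k with
  | zero => intro n h1 h2; rw [s_zero n (by omega)]; simp
  | succ k ih =>
    intro n h1 h2
    by_cases h0 : 0 < n
    · rw [s_rec n h0]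
      have hp : (10:Int) ^ (k+1) = 10 * 10 ^ k := by ring
      have := ih (n / 10) (by omega) (by omega)
      push_cast
      omega
    · rw [s_zero n h0]; positivity

theorem s_pow : ∀ (k : ℕ), addA ((10:Int) ^ k) = 1 := by
  intro k
  induction k with
  | zero =>
    simp only [pow_zero]
    rw [s_rec 1 (by norm_num)]
    norm_num [s_zero]
  | succ k ih =>
    have hp : (0:Int) < 10 ^ (k+1) := by positivity
    rw [s_rec _ hp]
    have h1 : (10:Int) ^ (k+1) % 10 = 0 := by
      have : (10:Int) ^ (k+1) = 10 ^ k * 10 := by ring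
      omega
    have h2 : (10:Int) ^ (k+1) / 10 = 10 ^ k := by
      have : (10:Int) ^ (k+1) = 10 ^ k * 10 := by ring
      omega
    rw [h1, h2, ih]
    norm_num

theorem s_eq_one (n : Int) (h1 : 1 ≤ n) (h2 : addA n = 1) : ∃ k : ℕ, n = 10 ^ k := by
  rw [s_rec n (by omega)] at h2
  have hqn := s_nonneg (n / 10)
  by_cases hq : 1 ≤ n / 10
  · have hp := s_pos (n / 10) hq
    have hm : n % 10 = 0 := by omega
    have hs : addA (n / 10) = 1 := by omega
    obtain ⟨k, hk⟩ := s_eq_one (n / 10) hq hs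
    exact ⟨k + 1, by push_cast [pow_succ]; omega⟩
  · have h0 : n / 10 = 0 := by omega
    rw [h0, s_zero 0 (by omega)] at h2
    exact ⟨0, by omega⟩
termination_by n.toNat
decreasing_by omega

-- members of pow10s are powers of ten with digit sum 1
theorem pow10s_pow (n : Int) (h : n ∈ pow10s) : ∃ k : ℕ, n = 10 ^ k := by
  simp only [pow10s, List.mem_cons, List.not_mem_nil, or_false] at h
  rcases h with h | h | h | h | h | h | h | h
  · exact ⟨2, by norm_num [h]⟩
  · exact ⟨3, by norm_num [h]⟩
  · exact ⟨4, by norm_num [h]⟩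
  · exact ⟨5, by norm_num [h]⟩
  · exact ⟨6, by norm_num [h]⟩
  · exact ⟨7, by norm_num [h]⟩
  · exact ⟨8, by norm_num [h]⟩
  · exact ⟨9, by norm_num [h]⟩

theorem s_pow10s (n : Int) (h : n ∈ pow10s) : addA n = 1 := by
  obtain ⟨k, rfl⟩ := pow10s_pow n h
  exact s_pow k

-- within the 32-bit domain, a power of ten above 10 is in the list
theorem pow10s_complete (n : Int) (h1 : 10 < n) (h2 : n ≤ 2147483648)
    (hs : addA n = 1) : n ∈ pow10s := by
  obtain ⟨k, rfl⟩ := s_eq_one n (by omega) hs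
  have hk2 : 2 ≤ k := by
    by_contra hc
    interval_cases k <;> omega
  have hk9 : k ≤ 9 := by
    by_contra hc
    have h10 : (10000000000:Int) ≤ 10 ^ k := by
      calc (10000000000:Int) = 10 ^ 10 := by norm_num
        _ ≤ 10 ^ k := pow_le_pow_right₀ (by norm_num) (by omega)
    omega
  interval_cases k <;> norm_num [pow10s]

-- A's outer loop does not move once the value is ≤ 10
theorem loop_stop (f : Nat) (m : Int) (h : m ≤ 10) : addDigitsLoop f m = m := by
  cases f with
  | zero => rfl
  | succ f =>
    rw [show addDigitsLoop (f + 1) m = if 10 < m then addDigitsLoop f (addA m) else m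
          from rfl,
        if_neg (by omega)]

-- the main induction: for 10 < n ≤ 2^31 and enough fuel, A's loop returns 1 on powers
-- of ten, 10 when n ≡ 1 (mod 9) otherwise, and the digital root otherwise
theorem main_eq : ∀ (f : Nat) (n : Int), n.toNat ≤ f → 10 < n → n ≤ 2147483648 →
    addDigitsLoop f n =
      (if n ∈ pow10s then 1 else if n % 9 = 1 then 10 else 1 + (n - 1) % 9) := by
  intro f
  induction f with
  | zero => intro n hf h1 _; omega
  | succ f ih =>
    intro n hf h1 h2
    have hm_lt : addA n < n := s_lt n h1
    have hm_pos : 1 ≤ addA n := s_pos n (by omega)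
    have hm_mod : addA n % 9 = n % 9 := s_mod9 n (by omega)
    have hm_small : addA n ≤ 90 := s_le_pow 10 n (by omega) (by norm_num; omega)
    simp only [addDigitsLoop, h1, if_true]
    by_cases hmle : addA n ≤ 10
    · rw [loop_stop f (addA n) hmle]
      by_cases hpw : n ∈ pow10s
      · rw [if_pos hpw]
        exact s_pow10s n hpw
      · rw [if_neg hpw]
        by_cases h9 : n % 9 = 1
        · rw [if_pos h9]
          have hne1 : addA n ≠ 1 := fun hs1 => hpw (pow10s_complete n h1 h2 hs1)
          omega
        · rw [if_neg h9]
          omega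
    · rw [ih (addA n) (by omega) (by omega) (by omega)]
      have hmL : addA n ∉ pow10s := by
        intro hmem
        -- every member of pow10s is ≥ 100, but addA n ≤ 90
        simp only [pow10s, List.mem_cons, List.not_mem_nil, or_false] at hmem
        omega
      rw [if_neg hmL]
      have hnL : n ∉ pow10s := by
        intro hmem
        have := s_pow10s n hmem
        omega
      rw [if_neg hnL]
      by_cases h9 : n % 9 = 1
      · rw [if_pos (show addA n % 9 = 1 by omega), if_pos h9]
      · rw [if_neg (show ¬ addA n % 9 = 1 by omega), if_neg h9]
        omega

theorem pow10_mod9 (k : ℕ) : (10:Int) ^ k % 9 = 1 := by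
  induction k with
  | zero => norm_num
  | succ j ihj =>
    have : (10:Int) ^ (j+1) = 10 ^ j * 10 := by ring
    omega

-- ===== VERDICT (by name: the statements are the Claim_ definitions above) =====

theorem addDigits_spec : Claim_unchanged_addDigits := by
  intro num hdom hnd
  simp only [Dom_addDigits, pvDomInt, decide_eq_true_eq] at hdom
  unfold D_addDigits at hnd
  push_neg at hnd
  by_cases hlt : num < 10
  · rw [addDigits, loop_stop _ _ (by omega), addDigits_alt, if_pos hlt]
  · have h10 : 10 < num := by omega
    have hB : addDigits_alt num = 1 + (num - 1) % 9 := by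
      rw [addDigits_alt, if_neg hlt,
          PySem.Int.mod_eq_emod_of_pos (by norm_num : (0:Int) < 9)]
    rw [addDigits, main_eq num.toNat num le_rfl h10 (by omega), hB]
    by_cases hpw : num ∈ pow10s
    · rw [if_pos hpw]
      obtain ⟨k, rfl⟩ := pow10s_pow num hpw
      have h91 := pow10_mod9 k
      omega
    · have h9 : num % 9 ≠ 1 := fun h => hpw (hnd.2 h10 h)
      rw [if_neg hpw, if_neg h9]

theorem addDigits_changed : Claim_changed_addDigits := by
  unfold Claim_changed_addDigits; decide

theorem addDigits_tight : Claim_exact_addDigits := by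
  intro num hdom hd
  simp only [Dom_addDigits, pvDomInt, decide_eq_true_eq] at hdom
  unfold D_addDigits at hd
  have hA : addDigits num = 10 := by
    rcases hd with rfl | ⟨h10, h9, hpw⟩
    · rw [addDigits, loop_stop _ _ (by omega)]
    · rw [addDigits, main_eq num.toNat num le_rfl h10 (by omega),
          if_neg hpw, if_pos h9]
  have hB : addDigits_alt num = 1 := by
    rcases hd with rfl | ⟨h10, h9, _⟩
    · decide
    · rw [addDigits_alt, if_neg (by omega),
          PySem.Int.mod_eq_emod_of_pos (by norm_num : (0:Int) < 9)]
      omega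
  rw [hA, hB]
  norm_num
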